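-- pv_equiv track=rewrite | github.com/IoachimusRoderici/MyLib | cuantas_lineas/cuantas_lineas.py | contenido_de_linea
-- ===== SOURCE A (Python) =====
-- def contenido_de_linea(linea, multilinea_abierto, singleline, multiline_open, multiline_close):
--     """
--     Determina qué contenidos tiene una línea en cuanto a código y comentarios.
--
--     Parmámetros:
--     - línea es la línea a analizar.
--     - multilinea_abierto indica si hay un comentario abierto de líneas anteriores.
--     - singleline es el símbolo que abre los comentarios unlínea
--     - multiline_open es el símbolo que abre los comentarios multilínea
--     - multiline_close es el símbolo que cierra los comentarios multilínea
--
--     Los contenidos de una línea pueden ser: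
--     - Código
--     - Comentario (con contenido)
--     - Dejar un multilínea abierto
--     - Cerrar un multilínea abierto en líneas anteriores
--
--     Devuelve una tupla con tres valores booleanos:
--     - tiene código
--     - tiene comentario
--     - deja multilínea abierto
--
--     Eleva una excepción si se cierra un multilínea que no fué abierto.
--     """
--     tiene_codigo       = False #Si hay código en esta línea
--     tiene_comentario   = False #Si hay comentario con contenido en esta línea
--     unilinea_abierto   = False #Si esta línea abre un unilínea
--
--     #Eliminar leading whietespace:
--     linea = linea.lstrip()
--
--     #Escanear la línea de izquierda a derecha en busca de comentarios y código:
--     while linea != "":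
--         #Ver si abre o cierra un comentario:
--         if linea.startswith(singleline):
--             #Si hay un comentario abierto, esto es parte de su contenido:
--             if multilinea_abierto or unilinea_abierto:
--                 tiene_comentario = True
--             #Si no, abre un comentario nuevo:
--             else:
--                 unilinea_abierto = True
--             #Avanzar:
--             linea = linea[len(singleline) : ]
--         elif linea.startswith(multiline_open) and multiline_open == multiline_close:
--             #Este caso se cumple en python.
--             #Si hay un comentario unilínea abierto, esto es parte de su contenido:
--             if unilinea_abierto:
--                 tiene_comentario = True
--             #Si no, si estaba abierto se cierra y si estaba cerrado se abre:
--             else: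
--                 multilinea_abierto = not multilinea_abierto
--             #Avanzar:
--             linea = linea[len(multiline_open) : ]
--         elif linea.startswith(multiline_open):
--             #Si hay un comentario abierto, esto es parte de su contenido:
--             if multilinea_abierto or unilinea_abierto:
--                 tiene_comentario = True
--             #Si no, abre un comentario nuevo:
--             else:
--                 multilinea_abierto = True
--             #Avanzar:
--             linea = linea[len(multiline_open) : ]
--         elif linea.startswith(multiline_close):
--             #Si estamos en un multilínea, se cierra:
--             if multilinea_abierto:
--                 multilinea_abierto = False
--             #Si estamos en un unilínea, esto es contenido:
--             elif unilinea_abierto: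
--                 tiene_comentario = True
--             #Si no estamos en un comentario, esto es un error:
--             else:
--                 raise Exception("Se cierra un multilínea que nunca fue abierto.")
--             #Avanzar:
--             linea = linea[len(multiline_close) : ]
--         #Si no empieza con comentario, esto es código o contenido:
--         else:
--             if unilinea_abierto or multilinea_abierto:
--                 tiene_comentario = True
--             else:
--                 tiene_codigo = True
--             #Avanzar un caracter:
--             linea = linea[1:]
--
--         #Eliminar leading whietespace:
--         linea = linea.lstrip()
--
--     return tiene_codigo, tiene_comentario, multilinea_abierto
-- ===== SOURCE B (Python) =====
-- def contenido_de_linea(linea, multilinea_abierto, singleline, multiline_open, multiline_close):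
--     # Pass 1: lex the line into a stream of token kinds (whitespace skipped between tokens).
--     tokens = []
--     resto = linea.lstrip()
--     while resto != "":
--         if resto.startswith(singleline):
--             tokens.append('single')
--             resto = resto[len(singleline):]
--         elif resto.startswith(multiline_open) and multiline_open == multiline_close:
--             tokens.append('toggle')
--             resto = resto[len(multiline_open):]
--         elif resto.startswith(multiline_open):
--             tokens.append('open')
--             resto = resto[len(multiline_open):]
--         elif resto.startswith(multiline_close):
--             tokens.append('close')
--             resto = resto[len(multiline_close):]
--         else:
--             tokens.append('char')
--             resto = resto[1:]
--         resto = resto.lstrip()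
--     # Pass 2: interpret the token stream with the comment-state machine.
--     tiene_codigo = False
--     tiene_comentario = False
--     unilinea_abierto = False
--     for tok in tokens:
--         if tok == 'single':
--             if multilinea_abierto or unilinea_abierto:
--                 tiene_comentario = True
--             else:
--                 unilinea_abierto = True
--         elif tok == 'toggle':
--             if unilinea_abierto:
--                 tiene_comentario = True
--             else:
--                 multilinea_abierto = not multilinea_abierto
--         elif tok == 'open':
--             if multilinea_abierto or unilinea_abierto:
--                 tiene_comentario = True
--             else:
--                 multilinea_abierto = True
--         elif tok == 'close':
--             if multilinea_abierto:
--                 multilinea_abierto = False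
--             elif unilinea_abierto:
--                 tiene_comentario = True
--             else:
--                 raise Exception("Se cierra un multilínea que nunca fue abierto.")
--         else:
--             if unilinea_abierto or multilinea_abierto:
--                 tiene_comentario = True
--             else:
--                 tiene_codigo = True
--     return tiene_codigo, tiene_comentario, multilinea_abierto
-- ===== Notes on version B (the rewrite author's own statement) =====
-- stated objective: alternative
-- what changed: A's single combined scan is split into two passes: a lexer that turns the line into a token stream (single/toggle/open/close/char) and a separate state-machine fold that interprets the tokens.
-- outside the precondition, e.g. on contenido_de_linea('aaa', False, 'a', '', ''): A returns (False, True, False), B returns (False, True, False)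
import Mathlib
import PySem

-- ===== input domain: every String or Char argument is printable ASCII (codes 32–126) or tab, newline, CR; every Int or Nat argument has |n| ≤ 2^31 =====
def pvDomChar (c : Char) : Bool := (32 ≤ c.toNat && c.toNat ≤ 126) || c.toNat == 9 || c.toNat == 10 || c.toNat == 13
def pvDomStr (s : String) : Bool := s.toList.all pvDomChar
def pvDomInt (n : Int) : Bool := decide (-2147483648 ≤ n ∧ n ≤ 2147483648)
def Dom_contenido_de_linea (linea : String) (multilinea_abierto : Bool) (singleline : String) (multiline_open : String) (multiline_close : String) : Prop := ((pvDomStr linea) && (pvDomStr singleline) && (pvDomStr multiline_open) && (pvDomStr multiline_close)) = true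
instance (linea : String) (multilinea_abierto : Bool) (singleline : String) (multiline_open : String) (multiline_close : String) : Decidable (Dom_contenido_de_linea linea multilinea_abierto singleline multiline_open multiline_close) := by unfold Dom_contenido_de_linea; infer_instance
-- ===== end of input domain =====

-- B replaces A's single combined scan by two passes — a lexer producing a token stream,
-- then a state-machine fold over the tokens — same cost, clearer decomposition (objective: alternative).

-- ===== PORT A =====
-- A's while-loop: one combined scan carrying (tiene_codigo, tiene_comentario, mla, uni).
-- Fuel bounds the loop (Python can diverge when a delimiter symbol is empty; such inputs are
-- outside Pre_, where every iteration consumes at least one character so fuel = length + 1 suffices).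
def pvLoopA (s o c : List Char) : Nat → List Char → Bool → Bool → Bool → Bool → Bool × Bool × Bool
  | 0, _, tc, tcm, mla, _ => (tc, tcm, mla)
  | fuel + 1, l, tc, tcm, mla, uni =>
    let l' := PySem.Chars.lstrip l
    if l' = [] then (tc, tcm, mla)
    else if PySem.Chars.startswith l' s then
      if mla || uni then pvLoopA s o c fuel (l'.drop s.length) tc true mla uni
      else pvLoopA s o c fuel (l'.drop s.length) tc tcm mla true
    else if PySem.Chars.startswith l' o && decide (o = c) then
      if uni then pvLoopA s o c fuel (l'.drop o.length) tc true mla uni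
      else pvLoopA s o c fuel (l'.drop o.length) tc tcm (!mla) uni
    else if PySem.Chars.startswith l' o then
      if mla || uni then pvLoopA s o c fuel (l'.drop o.length) tc true mla uni
      else pvLoopA s o c fuel (l'.drop o.length) tc tcm true uni
    else if PySem.Chars.startswith l' c then
      if mla then pvLoopA s o c fuel (l'.drop c.length) tc tcm false uni
      else if uni then pvLoopA s o c fuel (l'.drop c.length) tc true mla uni
      else (tc, tcm, mla)  -- Python raises Exception here; such inputs are outside Pre_
    else
      if uni || mla then pvLoopA s o c fuel (l'.drop 1) tc true mla uni
      else pvLoopA s o c fuel (l'.drop 1) true tcm mla uni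

def contenido_de_linea (linea : String) (multilinea_abierto : Bool) (singleline : String) (multiline_open : String) (multiline_close : String) : Bool × Bool × Bool :=
  pvLoopA singleline.toList multiline_open.toList multiline_close.toList
    (linea.toList.length + 1) linea.toList false false multilinea_abierto false

-- ===== PORT B =====
inductive PvTok : Type
  | single | toggle | opn | close | ch
deriving DecidableEq, Repr

-- Pass 1 of B: lex the line into a token stream (same fuel remark as for A's loop).
def pvLex (s o c : List Char) : Nat → List Char → List PvTok
  | 0, _ => []
  | fuel + 1, l =>
    let l' := PySem.Chars.lstrip l
    if l' = [] then []
    else if PySem.Chars.startswith l' s then .single :: pvLex s o c fuel (l'.drop s.length)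
    else if PySem.Chars.startswith l' o && decide (o = c) then .toggle :: pvLex s o c fuel (l'.drop o.length)
    else if PySem.Chars.startswith l' o then .opn :: pvLex s o c fuel (l'.drop o.length)
    else if PySem.Chars.startswith l' c then .close :: pvLex s o c fuel (l'.drop c.length)
    else .ch :: pvLex s o c fuel (l'.drop 1)

-- Pass 2 of B: interpret the token stream with the comment-state machine.
def pvInterp : List PvTok → Bool → Bool → Bool → Bool → Bool × Bool × Bool
  | [], tc, tcm, mla, _ => (tc, tcm, mla)
  | t :: ts, tc, tcm, mla, uni =>
    match t with
    | .single => if mla || uni then pvInterp ts tc true mla uni else pvInterp ts tc tcm mla true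
    | .toggle => if uni then pvInterp ts tc true mla uni else pvInterp ts tc tcm (!mla) uni
    | .opn    => if mla || uni then pvInterp ts tc true mla uni else pvInterp ts tc tcm true uni
    | .close  => if mla then pvInterp ts tc tcm false uni
                 else if uni then pvInterp ts tc true mla uni
                 else (tc, tcm, mla)  -- Python raises Exception here; such inputs are outside Pre_
    | .ch     => if uni || mla then pvInterp ts tc true mla uni else pvInterp ts true tcm mla uni

def contenido_de_linea_alt (linea : String) (multilinea_abierto : Bool) (singleline : String) (multiline_open : String) (multiline_close : String) : Bool × Bool × Bool :=
  pvInterp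
    (pvLex singleline.toList multiline_open.toList multiline_close.toList
      (linea.toList.length + 1) linea.toList)
    false false multilinea_abierto false

-- ===== PRECONDITION & SPEC =====
-- Validity scan used only by Pre_: whether A's Exception fires depends on the position of the
-- close symbol relative to the comment openings, so "no unmatched multiline close" admits no
-- static closed form; this scan tracks ONLY the two "comment open" flags needed to name that
-- condition and computes none of the three outputs.
def pvScanOK (s o c : List Char) : Nat → List Char → Bool → Bool → Bool
  | 0, _, _, _ => true
  | fuel + 1, l, mla, uni =>
    let l' := PySem.Chars.lstrip l
    if l' = [] then true
    else if PySem.Chars.startswith l' s then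
      pvScanOK s o c fuel (l'.drop s.length) mla (uni || !mla)
    else if PySem.Chars.startswith l' o && decide (o = c) then
      pvScanOK s o c fuel (l'.drop o.length) (if uni then mla else !mla) uni
    else if PySem.Chars.startswith l' o then
      pvScanOK s o c fuel (l'.drop o.length) (mla || !uni) uni
    else if PySem.Chars.startswith l' c then
      if mla then pvScanOK s o c fuel (l'.drop c.length) false uni
      else if uni then pvScanOK s o c fuel (l'.drop c.length) mla uni
      else false  -- exactly where A raises
    else pvScanOK s o c fuel (l'.drop 1) mla uni

-- Pre_ excludes (i) inputs on which A raises the unmatched-multiline-close Exception, and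
-- (ii) inputs with an empty delimiter symbol, on which A's scan almost always fails to advance
-- and diverges (the rare empty-delimiter inputs on which A still terminates are also excluded).
def Pre_contenido_de_linea (linea : String) (multilinea_abierto : Bool) (singleline : String) (multiline_open : String) (multiline_close : String) : Prop :=
  PySem.Chars.lstrip linea.toList = [] ∨
    (singleline ≠ "" ∧ multiline_open ≠ "" ∧ multiline_close ≠ "" ∧
      pvScanOK singleline.toList multiline_open.toList multiline_close.toList
        (linea.toList.length + 1) linea.toList multilinea_abierto false = true)

instance (linea : String) (multilinea_abierto : Bool) (singleline : String) (multiline_open : String) (multiline_close : String) : Decidable (Pre_contenido_de_linea linea multilinea_abierto singleline multiline_open multiline_close) := by unfold Pre_contenido_de_linea; infer_instance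

def pvWitness_contenido_de_linea : String × Bool × String × String × String :=
  ("x = 1 /* hola */ # chau", false, "#", "/*", "*/")

def Spec_contenido_de_linea (linea : String) (multilinea_abierto : Bool) (singleline : String) (multiline_open : String) (multiline_close : String) (out : Bool × Bool × Bool) : Prop := out = contenido_de_linea_alt linea multilinea_abierto singleline multiline_open multiline_close
instance (linea : String) (multilinea_abierto : Bool) (singleline : String) (multiline_open : String) (multiline_close : String) (out : Bool × Bool × Bool) : Decidable (Spec_contenido_de_linea linea multilinea_abierto singleline multiline_open multiline_close out) := by unfold Spec_contenido_de_linea; infer_instance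

-- ===== CLAIM (what is proved, stated in full; the proofs are below) =====
def Claim_equal_contenido_de_linea : Prop := ∀ (linea : String) (multilinea_abierto : Bool) (singleline : String) (multiline_open : String) (multiline_close : String), Dom_contenido_de_linea linea multilinea_abierto singleline multiline_open multiline_close → Pre_contenido_de_linea linea multilinea_abierto singleline multiline_open multiline_close → Spec_contenido_de_linea linea multilinea_abierto singleline multiline_open multiline_close (contenido_de_linea linea multilinea_abierto singleline multiline_open multiline_close)

-- ===== LEMMAS AND PROOFS =====
-- Fusion: interpreting B's token stream step by step is exactly A's combined scan
-- (for every fuel and every state, so in particular for the top-level calls).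
theorem pvInterp_pvLex (s o c : List Char) :
    ∀ (fuel : Nat) (l : List Char) (tc tcm mla uni : Bool),
      pvInterp (pvLex s o c fuel l) tc tcm mla uni = pvLoopA s o c fuel l tc tcm mla uni := by
  intro fuel
  induction fuel with
  | zero => intro l tc tcm mla uni; rfl
  | succ n ih =>
    intro l tc tcm mla uni
    simp only [pvLex, pvLoopA]
    split_ifs
    all_goals try simp only [pvInterp]
    all_goals try split_ifs
    all_goals first | rfl | exact ih _ _ _ _ _

-- ===== VERDICT (by name: the statement is the Claim_ definition above) =====
theorem contenido_de_linea_spec : Claim_equal_contenido_de_linea := by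
  intro linea mla s o c _ _
  unfold Spec_contenido_de_linea contenido_de_linea contenido_de_linea_alt
  exact (pvInterp_pvLex _ _ _ _ _ _ _ _ _).symm
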